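-- pv_equiv track=rewrite | github.com/k-syou/TIL | CodingTest/Practices/250319/5247_연산.py | bfs
-- ===== SOURCE A (Python) =====
-- from collections import deque
--
-- def bfs(n, m):
--     q = deque()
--     q.append((0, n))
--     size = max(m, n) * 2 + 1
--     visited = [0] * size
--     visited[n] = 1
--     while q:
--         cnt, num = q.popleft()
--         if num == m:
--             return cnt
--         for o in [1, -1, -10, 2]:
--             n_num = num + o if o != 2 else num * o
--             if n_num < 0 or n_num >= size:
--                 continue
--             if visited[n_num]:
--                 continue
--             visited[n_num] = 1
--             q.append((cnt + 1, n_num))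
-- ===== SOURCE B (Python) =====
-- def bfs(n, m):
--     size = max(m, n) * 2 + 1
--     seen = bytearray(size)
--     seen[m] = 1
--     frontier = [m]
--     d = 0
--     while n not in frontier:
--         nxt = []
--         for v in frontier:
--             cands = [v - 1, v + 1, v + 10]
--             if v % 2 == 0:
--                 cands.append(v // 2)
--             for u in cands:
--                 if 0 <= u < size and not seen[u]:
--                     seen[u] = 1
--                     nxt.append(u)
--         frontier = nxt
--         d += 1
--     return d
-- ===== Notes on version B (the rewrite author's own statement) =====
-- stated objective: alternative
-- what changed: Replaces A's forward BFS from n (a deque of (cnt,num) pairs with a visited list over the ops +1,-1,-10,*2) by a backward level-order search from m over the inverse operations (v-1, v+1, v+10, and v//2 for even v), with a per-level frontier list, a bytearray of seen cells and a depth counter; walks reverse one-to-one, so the minimal operation count is identical.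
-- outside the precondition, e.g. on bfs(-1, 5): A returns 5, B does not finish within the time limit
import Mathlib
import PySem

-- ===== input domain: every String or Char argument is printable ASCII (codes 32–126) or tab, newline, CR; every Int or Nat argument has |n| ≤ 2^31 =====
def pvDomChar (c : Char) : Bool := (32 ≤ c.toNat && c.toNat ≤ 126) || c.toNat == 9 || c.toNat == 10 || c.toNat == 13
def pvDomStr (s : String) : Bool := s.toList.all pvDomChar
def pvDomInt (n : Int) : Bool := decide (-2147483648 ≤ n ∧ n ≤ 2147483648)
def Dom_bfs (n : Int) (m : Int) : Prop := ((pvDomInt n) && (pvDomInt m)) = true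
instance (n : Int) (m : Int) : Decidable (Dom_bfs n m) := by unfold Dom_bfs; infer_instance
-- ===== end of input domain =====

-- B replaces A's forward BFS from n (deque of (cnt,num) pairs, ops +1/-1/-10/*2) by a
-- backward level search from m with the inverse operations (v-1, v+1, v+10, v//2 for even v);
-- walks reverse one-to-one, so the returned operation count is the same (no speed claim).

-- ===== PORT A =====
-- inner 'for o in [1, -1, -10, 2]' body: appends fresh children to the queue, marks visited
def akids (size cnt num : Int) (st : List (Int × Int) × Array Int) (ops : List Int) :
    List (Int × Int) × Array Int :=
  ops.foldl (fun st o =>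
    let n_num := if o ≠ 2 then num + o else num * o
    if n_num < 0 ∨ size ≤ n_num then st
    else if st.2.getD n_num.toNat 0 ≠ 0 then st
    else (st.1 ++ [(cnt + 1, n_num)], st.2.setIfInBounds n_num.toNat 1)) st

-- the 'while q' loop; fuel only for termination (size.toNat + 2 pops always suffice:
-- visited-on-enqueue bounds the number of enqueues by the number of cells)
def aloop (m size : Int) : Nat → List (Int × Int) → Array Int → Option Int
  | 0, _, _ => none
  | _ + 1, [], _ => none
  | f + 1, (cnt, num) :: qs, v =>
    if num = m then some cnt
    else
      let st := akids size cnt num (qs, v) [1, -1, -10, 2]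
      aloop m size f st.1 st.2

def bfs (n : Int) (m : Int) : Int :=
  let size := max m n * 2 + 1
  -- visited[n] = 1 : Python negative-index wraparound; exact when -size ≤ n < size
  let visited := (List.replicate size.toNat (0 : Int)).toArray.setIfInBounds
    (if n < 0 then (size + n).toNat else n.toNat) 1
  (aloop m size (size.toNat + 2) [(0, n)] visited).getD 0  -- .getD 0: Python returns None only outside Pre_

-- ===== PORT B =====
-- inverse-op candidates of one backward node: [v-1, v+1, v+10] (+ v//2 for even v)
def bcands (v : Int) : List Int :=
  [v - 1, v + 1, v + 10] ++
    (if PySem.Int.mod v 2 = 0 then [PySem.Int.floordiv v 2] else [])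

-- one while-iteration: for each v in frontier try its candidates in order, marking seen
-- and collecting the fresh in-range ones into the next level
def blevelB (size : Int) (frontier : List Int) (st : List Int × Array Int) :
    List Int × Array Int :=
  frontier.foldl (fun st v =>
    (bcands v).foldl (fun st u =>
      if 0 ≤ u ∧ u < size ∧ st.2.getD u.toNat 0 = 0 then
        (st.1 ++ [u], st.2.setIfInBounds u.toNat 1)
      else st) st) st

-- the 'while n not in frontier' loop; fuel only for termination (under Pre_ the start n is
-- backward-reachable from m within size steps, so size.toNat + 2 levels always suffice)
def bloopB (n size : Int) : Nat → List Int → Array Int → Int → Option Int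
  | 0, _, _, _ => none
  | f + 1, frontier, seen, d =>
    if n ∈ frontier then some d
    else
      let st := blevelB size frontier ([], seen)
      bloopB n size f st.1 st.2 (d + 1)

def bfs_alt (n : Int) (m : Int) : Int :=
  let size := max m n * 2 + 1
  -- seen[m] = 1 : exact for 0 ≤ m < size (all of Pre_)
  let seen := (List.replicate size.toNat (0 : Int)).toArray.setIfInBounds m.toNat 1
  (bloopB n size (size.toNat + 2) [m] seen 0).getD 0
  -- .getD 0: under Pre_ the loop always hits n first (proved below); Python returns only via the loop

-- ===== PRECONDITION & SPEC =====
-- Pre_ excludes negative n and negative m: there Python A raises IndexError (|n| or |m| too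
-- large), falls off the loop returning None, or (only n = -1, m ≥ 1) returns via negative-index
-- wraparound of visited[n]; B's backward search can never reach a negative start and does not
-- terminate there.
def Pre_bfs (n : Int) (m : Int) : Prop := 0 ≤ n ∧ 0 ≤ m
instance (n : Int) (m : Int) : Decidable (Pre_bfs n m) := by unfold Pre_bfs; infer_instance
def pvWitness_bfs : Int × Int := (3, 7)

def Spec_bfs (n : Int) (m : Int) (out : Int) : Prop := out = bfs_alt n m
instance (n : Int) (m : Int) (out : Int) : Decidable (Spec_bfs n m out) := by unfold Spec_bfs; infer_instance

-- ===== CLAIM (what is proved, stated in full; the proofs are below) =====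
def Claim_equal_bfs : Prop := ∀ (n : Int) (m : Int), Dom_bfs n m → Pre_bfs n m → Spec_bfs n m (bfs n m)

-- ===== LEMMAS AND PROOFS =====

-- ---------- proof-side array-level (forward, level-order) reformulation of A ----------

def lkids (size num : Int) (st : List Int × Array Int) (ops : List Int) : List Int × Array Int :=
  ops.foldl (fun st o =>
    let cand := if o = 2 then num * 2 else num + o
    if 0 ≤ cand ∧ cand < size ∧ st.2.getD cand.toNat 0 = 0 then
      (st.1 ++ [cand], st.2.setIfInBounds cand.toNat 1)
    else st) st

def llevel (size : Int) (frontier : List Int) (st : List Int × Array Int) : List Int × Array Int :=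
  frontier.foldl (fun st num => lkids size num st [1, -1, -10, 2]) st

-- counting helper: setting a 0-cell to 1 drops the 0-count by one
theorem count_set_one : ∀ (v : List Int) (i : Nat), i < v.length → v.getD i 0 = 0 →
    (v.set i 1).count 0 + 1 = v.count 0 := by
  intro v
  induction v with
  | nil => intro i h _; simp at h
  | cons a t ih =>
    intro i hi hg
    cases i with
    | zero => simp_all
    | succ j =>
      simp only [List.set_cons_succ, List.count_cons]
      have := ih j (by simpa using hi) (by simpa using hg)
      omega

-- Array/List bridge for the visited array
theorem arr_getD (a : Array Int) (i : Nat) (d : Int) : a.getD i d = a.toList.getD i d := by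
  simp only [Array.getD, List.getD_eq_getElem?_getD]
  split
  · next h =>
    rw [List.getElem?_eq_getElem (by simpa using h)]
    simp [Array.getElem_toList]
  · next h =>
    rw [List.getElem?_eq_none (by simp at h ⊢; omega)]
    simp

-- lkids only appends to its accumulator
theorem lkids_acc : ∀ (ops : List Int) (size num : Int) (acc : List Int) (v : Array Int),
    lkids size num (acc, v) ops =
      (acc ++ (lkids size num ([], v) ops).1, (lkids size num ([], v) ops).2) := by
  intro ops
  induction ops with
  | nil => intro size num acc v; simp [lkids]
  | cons o ops ih =>
    intro size num acc v
    simp only [lkids, List.foldl_cons] at *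
    set cand := (if o = 2 then num * 2 else num + o) with hcand
    by_cases hg : 0 ≤ cand ∧ cand < size ∧ v.getD cand.toNat 0 = 0
    · rw [if_pos hg, if_pos hg]
      rw [ih size num (acc ++ [cand]) (v.setIfInBounds cand.toNat 1),
          ih size num ([] ++ [cand]) (v.setIfInBounds cand.toNat 1)]
      simp
    · rw [if_neg hg, if_neg hg]
      exact ih size num acc v

-- A's inner fold is lkids with each child paired with cnt + 1
theorem akids_rel : ∀ (ops : List Int) (size cnt num : Int) (q : List (Int × Int)) (v : Array Int),
    akids size cnt num (q, v) ops =
      (q ++ (lkids size num ([], v) ops).1.map (fun x => (cnt + 1, x)),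
       (lkids size num ([], v) ops).2) := by
  intro ops
  induction ops with
  | nil => intro size cnt num q v; simp [akids, lkids]
  | cons o ops ih =>
    intro size cnt num q v
    have hxx : (if o ≠ 2 then num + o else num * o) = (if o = 2 then num * 2 else num + o) := by
      by_cases h : o = 2 <;> simp [h]
    simp only [akids, lkids, List.foldl_cons] at *
    rw [hxx]
    set cand := (if o = 2 then num * 2 else num + o) with hcand
    by_cases h1 : cand < 0 ∨ size ≤ cand
    · have h2 : ¬ (0 ≤ cand ∧ cand < size ∧ v.getD cand.toNat 0 = 0) := by
        rcases h1 with h | h <;> intro hc <;> omega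
      rw [if_pos h1, if_neg h2]
      exact ih size cnt num q v
    · by_cases h3 : v.getD cand.toNat 0 = 0
      · have h2 : 0 ≤ cand ∧ cand < size ∧ v.getD cand.toNat 0 = 0 :=
          ⟨by omega, by omega, h3⟩
        have h4 : ¬ v.getD cand.toNat 0 ≠ 0 := not_not_intro h3
        rw [if_neg h1, if_neg h4, if_pos h2]
        rw [ih size cnt num (q ++ [(cnt + 1, cand)]) (v.setIfInBounds cand.toNat 1)]
        have hb := lkids_acc ops size num ([] ++ [cand]) (v.setIfInBounds cand.toNat 1)
        simp only [lkids] at hb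
        rw [hb]
        simp
      · have h2 : ¬ (0 ≤ cand ∧ cand < size ∧ v.getD cand.toNat 0 = 0) := by
          intro hc; exact h3 hc.2.2
        have h4 : v.getD cand.toNat 0 ≠ 0 := h3
        rw [if_neg h1, if_pos h4, if_neg h2]
        exact ih size cnt num q v

-- fresh-cell accounting for the inner fold: each appended child consumes one 0-cell
theorem lkids_zeros : ∀ (ops : List Int) (size num : Int) (acc : List Int) (v : Array Int),
    v.toList.length = size.toNat →
    (lkids size num (acc, v) ops).2.toList.length = size.toNat ∧
    (lkids size num (acc, v) ops).1.length + (lkids size num (acc, v) ops).2.toList.count 0 =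
      acc.length + v.toList.count 0 := by
  intro ops
  induction ops with
  | nil => intro size num acc v hv; simp [lkids, hv]
  | cons o ops ih =>
    intro size num acc v hv
    simp only [lkids, List.foldl_cons] at *
    set cand := (if o = 2 then num * 2 else num + o) with hcand
    by_cases hg : 0 ≤ cand ∧ cand < size ∧ v.getD cand.toNat 0 = 0
    · rw [if_pos hg]
      obtain ⟨hg1, hg2, hg3⟩ := hg
      have hlt : cand.toNat < v.toList.length := by omega
      have hg' : v.toList.getD cand.toNat 0 = 0 := by rw [← arr_getD]; exact hg3
      have hcnt := count_set_one v.toList cand.toNat hlt hg'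
      have hts : (v.setIfInBounds cand.toNat 1).toList = v.toList.set cand.toNat 1 := by simp
      have := ih size num (acc ++ [cand]) (v.setIfInBounds cand.toNat 1) (by simp [hv])
      rcases this with ⟨hl, hc⟩
      rw [hts] at hc
      refine ⟨hl, ?_⟩
      simp only [List.length_append, List.length_singleton] at hc
      omega
    · rw [if_neg hg]
      exact ih size num acc v hv

-- fresh-cell accounting lifted to a whole level
theorem llevel_zeros : ∀ (cur : List Int) (size : Int) (acc : List Int) (v : Array Int),
    v.toList.length = size.toNat →
    (llevel size cur (acc, v)).2.toList.length = size.toNat ∧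
    (llevel size cur (acc, v)).1.length + (llevel size cur (acc, v)).2.toList.count 0 =
      acc.length + v.toList.count 0 := by
  intro cur
  induction cur with
  | nil => intro size acc v hv; simp [llevel, hv]
  | cons c cs ih =>
    intro size acc v hv
    have hz := lkids_zeros [1, -1, -10, 2] size c acc v hv
    have h2 := ih size (lkids size c (acc, v) [1, -1, -10, 2]).1
      (lkids size c (acc, v) [1, -1, -10, 2]).2 hz.1
    have hstep : llevel size (c :: cs) (acc, v) =
        llevel size cs (lkids size c (acc, v) [1, -1, -10, 2]) := by
      simp [llevel]
    rw [hstep]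
    have he : ((lkids size c (acc, v) [1, -1, -10, 2]).1,
        (lkids size c (acc, v) [1, -1, -10, 2]).2) =
        lkids size c (acc, v) [1, -1, -10, 2] := rfl
    have h21 := h2.1
    have h22 := h2.2
    rw [he] at h21 h22
    have hz2 := hz.2
    exact ⟨h21, by omega⟩

-- A pops one whole depth-d level: it returns d iff m is in the level, else the queue becomes
-- exactly the next level llevel builds, with the same visited array
theorem levelA : ∀ (cur : List Int) (m size : Int) (f : Nat) (nxt : List Int) (v : Array Int) (d : Int),
    aloop m size (cur.length + f)
        (cur.map (fun x => (d, x)) ++ nxt.map (fun x => (d + 1, x))) v =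
      if m ∈ cur then some d
      else aloop m size f ((llevel size cur (nxt, v)).1.map (fun x => (d + 1, x)))
             (llevel size cur (nxt, v)).2 := by
  intro cur
  induction cur with
  | nil => intro m size f nxt v d; simp [llevel]
  | cons c cs ih =>
    intro m size f nxt v d
    have hlen : (c :: cs).length + f = (cs.length + f) + 1 := by simp; omega
    rw [hlen]
    simp only [List.map_cons, List.cons_append, aloop]
    rw [akids_rel]
    rcases hk : lkids size c ([], v) [1, -1, -10, 2] with ⟨K, v'⟩
    have hq : cs.map (fun x => (d, x)) ++ nxt.map (fun x => (d + 1, x)) ++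
        K.map (fun x => (d + 1, x)) =
        cs.map (fun x => (d, x)) ++ (nxt ++ K).map (fun x => (d + 1, x)) := by
      simp [List.map_append]
    have hbl : llevel size (c :: cs) (nxt, v) = llevel size cs (nxt ++ K, v') := by
      simp only [llevel, List.foldl_cons]
      rw [lkids_acc _ size c nxt v, hk]
    rw [hbl]
    by_cases hc : c = m
    · have hm : m ∈ c :: cs := by simp [hc]
      simp [hc]
    · have hcm : ¬ (c = m) := hc
      simp only [hcm, if_neg, not_false_iff]
      rw [hq, ih m size f (nxt ++ K) v' d]
      by_cases hm : m ∈ cs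
      · have : m ∈ c :: cs := List.mem_cons_of_mem _ hm
        simp [hm, this]
      · have hmc : m ∉ c :: cs := by
          simp only [List.mem_cons, not_or]
          exact ⟨fun h => hcm (Eq.symm h), hm⟩
        simp [hm, hmc]

-- ---------- the abstract layered reachability theory ----------

-- forward edge of A's state graph (target clipped to [0, size))
def fnbr (size u v : Int) : Prop :=
  (v = u + 1 ∨ v = u - 1 ∨ v = u - 10 ∨ v = u * 2) ∧ 0 ≤ v ∧ v < size

-- backward edge used by B (target clipped to [0, size)); bnbr size v u reverses fnbr size u v
def bnbr (size v u : Int) : Prop :=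
  (u = v - 1 ∨ u = v + 1 ∨ u = v + 10 ∨ u * 2 = v) ∧ 0 ≤ u ∧ u < size

-- W nbr a d b: b reachable from a in at most d nbr-steps (last-step decomposition)
def W (nbr : Int → Int → Prop) (a : Int) : Nat → Int → Prop
  | 0, b => b = a
  | d + 1, b => W nbr a d b ∨ ∃ c, W nbr a d c ∧ nbr c b

theorem W_le {nbr : Int → Int → Prop} {a b : Int} :
    ∀ {e d : Nat}, d ≤ e → W nbr a d b → W nbr a e b := by
  intro e
  induction e with
  | zero =>
    intro d hd h
    have hd0 : d = 0 := by omega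
    subst hd0
    exact h
  | succ e ih =>
    intro d hd h
    by_cases hde : d = e + 1
    · subst hde; exact h
    · exact Or.inl (ih (by omega) h)

-- first-step variant of W
def Wf (nbr : Int → Int → Prop) : Nat → Int → Int → Prop
  | 0, a, b => b = a
  | d + 1, a, b => Wf nbr d a b ∨ ∃ c, nbr a c ∧ Wf nbr d c b

theorem Wf_append {nbr : Int → Int → Prop} :
    ∀ {d : Nat} {a c b : Int}, Wf nbr d a c → nbr c b → Wf nbr (d + 1) a b := by
  intro d
  induction d with
  | zero =>
    intro a c b h hn
    cases h
    exact Or.inr ⟨b, hn, rfl⟩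
  | succ d ih =>
    intro a c b h hn
    rcases h with h | ⟨e, he, hw⟩
    · exact Or.inl (ih h hn)
    · exact Or.inr ⟨e, he, ih hw hn⟩

theorem Wf_decomp {nbr : Int → Int → Prop} :
    ∀ {d : Nat} {a b : Int}, Wf nbr (d + 1) a b →
      Wf nbr d a b ∨ ∃ c, Wf nbr d a c ∧ nbr c b := by
  intro d
  induction d with
  | zero =>
    intro a b h
    rcases h with h | ⟨c, hn, hc⟩
    · exact Or.inl h
    · cases hc; exact Or.inr ⟨a, rfl, hn⟩
  | succ d ih =>
    intro a b h
    rcases h with h | ⟨e, hn, hw⟩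
    · exact Or.inl h
    · rcases ih hw with h2 | ⟨c, hc, hcb⟩
      · exact Or.inl (Or.inr ⟨e, hn, h2⟩)
      · exact Or.inr ⟨c, Or.inr ⟨e, hn, hc⟩, hcb⟩

theorem W_eq_Wf {nbr : Int → Int → Prop} :
    ∀ (d : Nat) (a b : Int), W nbr a d b ↔ Wf nbr d a b := by
  intro d
  induction d with
  | zero => intro a b; exact Iff.rfl
  | succ d ih =>
    intro a b
    constructor
    · rintro (h | ⟨c, hc, hn⟩)
      · exact Or.inl ((ih a b).1 h)
      · exact Wf_append ((ih a c).1 hc) hn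
    · intro h
      rcases Wf_decomp h with h | ⟨c, hc, hn⟩
      · exact Or.inl ((ih a b).2 h)
      · exact Or.inr ⟨c, (ih a c).2 hc, hn⟩

-- closure: every node W-reachable from a satisfies R when a does and nbr-targets do
theorem W_R {nbr : Int → Int → Prop} {R : Int → Prop}
    (hnbr : ∀ x y, nbr x y → R y) :
    ∀ {d : Nat} {a b : Int}, R a → W nbr a d b → R b := by
  intro d
  induction d with
  | zero => intro a b ha h; cases h; exact ha
  | succ d ih =>
    intro a b ha h
    rcases h with h | ⟨c, _, hn⟩
    · exact ih ha h
    · exact hnbr c b hn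

-- walk reversal: reachability with nbr equals reachability with the flipped relation
theorem W_swap {nbr nbr' : Int → Int → Prop} {R : Int → Prop}
    (hR : ∀ x y, nbr x y → R y) (hR' : ∀ x y, nbr' x y → R y)
    (hdual : ∀ x y, R x → R y → (nbr x y ↔ nbr' y x)) :
    ∀ (d : Nat) (a b : Int), R a → R b → (W nbr a d b ↔ W nbr' b d a) := by
  intro d
  induction d with
  | zero => intro a b _ _; exact ⟨fun h => h.symm, fun h => h.symm⟩
  | succ d ih =>
    intro a b hRa hRb
    have hfirst : W nbr' b (d + 1) a ↔ W nbr' b d a ∨ ∃ c, nbr' b c ∧ W nbr' c d a := by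
      simp only [W_eq_Wf]
      exact Iff.rfl
    rw [hfirst]
    constructor
    · rintro (h | ⟨c, hc, hn⟩)
      · exact Or.inl ((ih a b hRa hRb).1 h)
      · have hRc : R c := W_R hR hRa hc
        exact Or.inr ⟨c, (hdual c b hRc hRb).1 hn, (ih a c hRa hRc).1 hc⟩
    · rintro (h | ⟨c, hn, hw⟩)
      · exact Or.inl ((ih a b hRa hRb).2 h)
      · have hRc : R c := hR' b c hn
        exact Or.inr ⟨c, (ih a c hRa hRc).2 hw, (hdual c b hRc hRb).2 hn⟩

-- stabilization: once a layer adds nothing, every later layer is the same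
theorem W_stab {nbr : Int → Int → Prop} {a : Int} {q : Nat}
    (h : ∀ u, W nbr a (q + 1) u → W nbr a q u) :
    ∀ (k : Nat) (u : Int), W nbr a (q + k) u → W nbr a q u := by
  intro k
  induction k with
  | zero => intro u hu; exact hu
  | succ k ih =>
    intro u hu
    rcases hu with hu | ⟨c, hc, hn⟩
    · exact ih u hu
    · exact h u (Or.inr ⟨c, ih c hc, hn⟩)

-- one level of any of the two searches, stated on membership predicates only
theorem stepInv {nbr : Int → Int → Prop} {a : Int} {dN : Nat}
    {F M F' M' : Int → Prop}
    (hF : ∀ u, F u ↔ W nbr a dN u ∧ ¬ ∃ e, e < dN ∧ W nbr a e u)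
    (hM : ∀ u, M u ↔ W nbr a dN u)
    (hM' : ∀ u, M' u ↔ M u ∨ ∃ x, F x ∧ nbr x u)
    (hF' : ∀ u, F' u ↔ (∃ x, F x ∧ nbr x u) ∧ ¬ M u) :
    (∀ u, M' u ↔ W nbr a (dN + 1) u) ∧
    (∀ u, F' u ↔ W nbr a (dN + 1) u ∧ ¬ ∃ e, e < dN + 1 ∧ W nbr a e u) := by
  have key : ∀ u, (∃ x, F x ∧ nbr x u) ∨ W nbr a dN u ↔ W nbr a (dN + 1) u := by
    intro u
    constructor
    · rintro (⟨x, hx, hn⟩ | h)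
      · exact Or.inr ⟨x, ((hF x).1 hx).1, hn⟩
      · exact Or.inl h
    · rintro (h | ⟨c, hc, hn⟩)
      · exact Or.inr h
      · by_cases hu : W nbr a dN u
        · exact Or.inr hu
        · by_cases hcold : ∃ e, e < dN ∧ W nbr a e c
          · rcases hcold with ⟨e, he, hw⟩
            have hstep : W nbr a (e + 1) u := Or.inr ⟨c, hw, hn⟩
            exact absurd (W_le (by omega) hstep) hu
          · exact Or.inl ⟨c, (hF c).2 ⟨hc, hcold⟩, hn⟩
  constructor
  · intro u
    rw [hM' u, hM u]
    constructor
    · rintro (h | h)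
      · exact (key u).1 (Or.inr h)
      · exact (key u).1 (Or.inl h)
    · intro h
      rcases (key u).2 h with h | h
      · exact Or.inr h
      · exact Or.inl h
  · intro u
    rw [hF' u, hM u]
    have hpre : (¬ ∃ e, e < dN + 1 ∧ W nbr a e u) ↔ ¬ W nbr a dN u := by
      constructor
      · intro h hw; exact h ⟨dN, by omega, hw⟩
      · intro h ⟨e, he, hw⟩; exact h (W_le (by omega) hw)
    rw [hpre]
    constructor
    · rintro ⟨h1, h2⟩
      exact ⟨(key u).1 (Or.inl h1), h2⟩
    · rintro ⟨h1, h2⟩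
      rcases (key u).2 h1 with h | h
      · exact ⟨h, h2⟩
      · exact absurd h h2

-- ---------- characterizing A's level step by layers ----------

def marks (size : Int) (v : Array Int) (u : Int) : Prop :=
  0 ≤ u ∧ u < size ∧ v.getD u.toNat 0 ≠ 0

def Cand (size num : Int) (ops : List Int) (u : Int) : Prop :=
  (∃ o ∈ ops, u = (if o = 2 then num * 2 else num + o)) ∧ 0 ≤ u ∧ u < size

theorem getD_set_list (l : List Int) (i j : Nat) (hi : i < l.length) :
    (l.set i (1 : Int)).getD j 0 = if j = i then 1 else l.getD j 0 := by
  simp only [List.getD_eq_getElem?_getD, List.getElem?_set]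
  by_cases h : j = i
  · subst h
    simp [hi]
  · have h' : i ≠ j := Ne.symm h
    simp [h, h']

theorem marks_set {size : Int} {v : Array Int} {c : Int}
    (hv : v.toList.length = size.toNat) (hc0 : 0 ≤ c) (hcs : c < size) :
    ∀ u, marks size (v.setIfInBounds c.toNat 1) u ↔ marks size v u ∨ u = c := by
  intro u
  have hts : (v.setIfInBounds c.toNat 1).toList = v.toList.set c.toNat 1 := by simp
  constructor
  · rintro ⟨h0, hs, hne⟩
    rw [arr_getD, hts, getD_set_list _ _ _ (by omega)] at hne
    by_cases he : u.toNat = c.toNat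
    · right; omega
    · left; exact ⟨h0, hs, by rw [arr_getD]; simpa [he] using hne⟩
  · rintro (⟨h0, hs, hne⟩ | he)
    · refine ⟨h0, hs, ?_⟩
      rw [arr_getD, hts, getD_set_list _ _ _ (by omega)]
      by_cases he : u.toNat = c.toNat
      · simp [he]
      · rw [arr_getD] at hne; simpa [he] using hne
    · subst he
      refine ⟨hc0, hcs, ?_⟩
      rw [arr_getD, hts, getD_set_list _ _ _ (by omega)]
      simp

theorem lkids_post : ∀ (ops : List Int) (size num : Int) (acc : List Int) (v : Array Int),
    v.toList.length = size.toNat →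
    (lkids size num (acc, v) ops).2.toList.length = size.toNat ∧
    (∀ u, marks size (lkids size num (acc, v) ops).2 u ↔
        marks size v u ∨ Cand size num ops u) ∧
    (∀ u, u ∈ (lkids size num (acc, v) ops).1 ↔
        u ∈ acc ∨ (Cand size num ops u ∧ ¬ marks size v u)) := by
  intro ops
  induction ops with
  | nil =>
    intro size num acc v hv
    refine ⟨hv, fun u => ?_, fun u => ?_⟩ <;> simp [lkids, Cand]
  | cons o ops ih =>
    intro size num acc v hv
    simp only [lkids, List.foldl_cons] at *
    set c := (if o = 2 then num * 2 else num + o) with hc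
    have hcand : ∀ u, Cand size num (o :: ops) u ↔
        (u = c ∧ 0 ≤ c ∧ c < size) ∨ Cand size num ops u := by
      intro u
      simp only [Cand, List.mem_cons]
      constructor
      · rintro ⟨⟨o', ho', he⟩, hr1, hr2⟩
        rcases ho' with rfl | ho'
        · exact Or.inl ⟨he, by omega, by omega⟩
        · exact Or.inr ⟨⟨o', ho', he⟩, hr1, hr2⟩
      · rintro (⟨he, h1, h2⟩ | ⟨⟨o', ho', he⟩, hr1, hr2⟩)
        · exact ⟨⟨o, Or.inl rfl, he⟩, by omega, by omega⟩
        · exact ⟨⟨o', Or.inr ho', he⟩, hr1, hr2⟩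
    by_cases hg : 0 ≤ c ∧ c < size ∧ v.getD c.toNat 0 = 0
    · rw [if_pos hg]
      obtain ⟨hg1, hg2, hg3⟩ := hg
      have hms := marks_set hv hg1 hg2
      have hfresh : ¬ marks size v c := fun h => h.2.2 hg3
      obtain ⟨hl, hm, ha⟩ := ih size num (acc ++ [c]) (v.setIfInBounds c.toNat 1) (by simp [hv])
      refine ⟨hl, fun u => ?_, fun u => ?_⟩
      · rw [hm u, hms u, hcand u]
        by_cases hu : u = c
        · subst hu; tauto
        · tauto
      · rw [ha u, hcand u, hms u]
        simp only [List.mem_append, List.mem_singleton]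
        by_cases hu : u = c
        · subst hu; tauto
        · tauto
    · rw [if_neg hg]
      obtain ⟨hl, hm, ha⟩ := ih size num acc v hv
      refine ⟨hl, fun u => ?_, fun u => ?_⟩
      · rw [hm u, hcand u]
        constructor
        · tauto
        · rintro (h | (⟨rfl, h1, h2⟩ | hcd))
          · tauto
          · -- c was in range but already marked
            left
            exact ⟨h1, h2, fun h0 => hg ⟨h1, h2, h0⟩⟩
          · tauto
      · rw [ha u, hcand u]
        constructor
        · tauto
        · rintro (h | ⟨(⟨rfl, h1, h2⟩ | hcd), hnm⟩)
          · tauto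
          · exact absurd ⟨h1, h2, fun h0 => hg ⟨h1, h2, h0⟩⟩ hnm
          · tauto

theorem Cand_four : ∀ (size num u : Int),
    Cand size num [1, -1, -10, 2] u ↔ fnbr size num u := by
  intro size num u
  simp only [Cand, fnbr, List.mem_cons, List.not_mem_nil]
  constructor
  · rintro ⟨⟨o, ho, he⟩, h1, h2⟩
    rcases ho with rfl | rfl | rfl | rfl | h
    · exact ⟨Or.inl (by simpa using he), h1, h2⟩
    · exact ⟨Or.inr (Or.inl (by norm_num at he; omega)), h1, h2⟩
    · exact ⟨Or.inr (Or.inr (Or.inl (by norm_num at he; omega))), h1, h2⟩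
    · exact ⟨Or.inr (Or.inr (Or.inr (by simpa using he))), h1, h2⟩
    · cases h
  · rintro ⟨(he | he | he | he), h1, h2⟩
    · exact ⟨⟨1, by norm_num, by norm_num; omega⟩, h1, h2⟩
    · exact ⟨⟨-1, by norm_num, by norm_num; omega⟩, h1, h2⟩
    · exact ⟨⟨-10, by norm_num, by norm_num; omega⟩, h1, h2⟩
    · exact ⟨⟨2, by norm_num, by simpa using he⟩, h1, h2⟩

def FCand (size : Int) (front : List Int) (u : Int) : Prop := ∃ x ∈ front, fnbr size x u

theorem llevel_post : ∀ (front : List Int) (size : Int) (acc : List Int) (v : Array Int),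
    v.toList.length = size.toNat →
    (llevel size front (acc, v)).2.toList.length = size.toNat ∧
    (∀ u, marks size (llevel size front (acc, v)).2 u ↔
        marks size v u ∨ FCand size front u) ∧
    (∀ u, u ∈ (llevel size front (acc, v)).1 ↔
        u ∈ acc ∨ (FCand size front u ∧ ¬ marks size v u)) := by
  intro front
  induction front with
  | nil =>
    intro size acc v hv
    refine ⟨hv, fun u => ?_, fun u => ?_⟩ <;> simp [llevel, FCand]
  | cons x rest ih =>
    intro size acc v hv
    have hstep : llevel size (x :: rest) (acc, v) =
        llevel size rest (lkids size x (acc, v) [1, -1, -10, 2]) := by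
      simp [llevel]
    obtain ⟨hl1, hm1, ha1⟩ := lkids_post [1, -1, -10, 2] size x acc v hv
    rcases hk : lkids size x (acc, v) [1, -1, -10, 2] with ⟨acc1, v1⟩
    rw [hk] at hl1 hm1 ha1
    obtain ⟨hl2, hm2, ha2⟩ := ih size acc1 v1 hl1
    rw [hstep, hk]
    have hfc : ∀ u, FCand size (x :: rest) u ↔ fnbr size x u ∨ FCand size rest u := by
      intro u
      simp only [FCand, List.mem_cons]
      constructor
      · rintro ⟨y, (rfl | hy), hn⟩
        · exact Or.inl hn
        · exact Or.inr ⟨y, hy, hn⟩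
      · rintro (hn | ⟨y, hy, hn⟩)
        · exact ⟨x, Or.inl rfl, hn⟩
        · exact ⟨y, Or.inr hy, hn⟩
    refine ⟨hl2, fun u => ?_, fun u => ?_⟩
    · rw [hm2 u, hm1 u, Cand_four, hfc u]
      tauto
    · rw [ha2 u, ha1 u, Cand_four, hfc u]
      constructor
      · rintro (h | ⟨hfcr, hnm⟩)
        · tauto
        · rw [hm1 u, Cand_four] at hnm
          push_neg at hnm
          tauto
      · rintro (h | ⟨(hx | hr), hnm⟩)
        · tauto
        · tauto
        · by_cases hx2 : fnbr size x u
          · tauto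
          · refine Or.inr ⟨hr, ?_⟩
            rw [hm1 u, Cand_four]
            tauto

-- ---------- A's loop returns the minimal layer index of m ----------

theorem runA (size n m : Int) (d0 : Nat)
    (hd0 : W (fnbr size) n d0 m) (hmin : ∀ e, W (fnbr size) n e m → d0 ≤ e) :
    ∀ (fuel : Nat), ∀ (dN : Nat) (frontier : List Int) (v : Array Int),
    v.toList.length = size.toNat →
    (∀ u, u ∈ frontier ↔ W (fnbr size) n dN u ∧ ¬ ∃ e, e < dN ∧ W (fnbr size) n e u) →
    (∀ u, marks size v u ↔ W (fnbr size) n dN u) →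
    dN ≤ d0 →
    frontier.length + v.toList.count 0 < fuel →
    aloop m size fuel (frontier.map fun x => ((dN : Int), x)) v = some (d0 : Int) := by
  intro fuel
  induction fuel using Nat.strong_induction_on with
  | _ fuel ihf =>
  intro dN frontier v hv hF hM hdle hcnt
  match fuel, hcnt with
  | F + 1, hcnt =>
  cases frontier with
  | nil =>
    exfalso
    cases dN with
    | zero =>
      have : n ∈ ([] : List Int) := (hF n).2 ⟨rfl, by omega⟩
      simp at this
    | succ q =>
      have hdrop : ∀ u, W (fnbr size) n (q + 1) u → W (fnbr size) n q u := by
        intro u hu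
        by_cases hold : ∃ e, e < q + 1 ∧ W (fnbr size) n e u
        · rcases hold with ⟨e, he, hw⟩
          exact W_le (by omega) hw
        · have : u ∈ ([] : List Int) := (hF u).2 ⟨hu, hold⟩
          simp at this
      have hqd : q + (d0 - q) = d0 := by omega
      have := W_stab hdrop (d0 - q) m (by rw [hqd]; exact hd0)
      have := hmin q this
      omega
  | cons c cs =>
    have hlen1 : (c :: cs).length = cs.length + 1 := by simp
    have hflen : (c :: cs).length ≤ F := by omega
    have hsplit : F + 1 = (c :: cs).length + (F + 1 - (c :: cs).length) := by omega
    rw [hsplit]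
    have h0 : (c :: cs).map (fun x => ((dN : Int), x)) =
        (c :: cs).map (fun x => ((dN : Int), x)) ++
          ([] : List Int).map (fun x => ((dN : Int) + 1, x)) := by simp
    rw [h0, levelA (c :: cs) m size (F + 1 - (c :: cs).length) [] v (dN : Int)]
    by_cases hm : m ∈ c :: cs
    · rw [if_pos hm]
      have hWm : W (fnbr size) n dN m := ((hF m).1 hm).1
      have : d0 ≤ dN := hmin dN hWm
      have : dN = d0 := by omega
      subst this
      rfl
    · rw [if_neg hm]
      have hdlt : dN < d0 := by
        rcases Nat.lt_or_ge dN d0 with h | h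
        · exact h
        · exfalso
          have : dN = d0 := by omega
          subst this
          exact hm ((hF m).2 ⟨hd0, fun ⟨e, he, hw⟩ => by have := hmin e hw; omega⟩)
      obtain ⟨hl', hm', ha'⟩ := llevel_post (c :: cs) size [] v hv
      obtain ⟨hM2, hF2⟩ := stepInv hF hM
        (M' := fun u => marks size (llevel size (c :: cs) ([], v)).2 u)
        (F' := fun u => u ∈ (llevel size (c :: cs) ([], v)).1)
        (by intro u
            show marks size (llevel size (c :: cs) ([], v)).2 u ↔
              marks size v u ∨ ∃ x, x ∈ c :: cs ∧ fnbr size x u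
            rw [hm' u]
            unfold FCand
            exact Iff.rfl)
        (by intro u
            show u ∈ (llevel size (c :: cs) ([], v)).1 ↔
              (∃ x, x ∈ c :: cs ∧ fnbr size x u) ∧ ¬ marks size v u
            rw [ha' u]
            unfold FCand
            simp only [List.not_mem_nil, false_or])
      obtain ⟨hlz, hcz⟩ := llevel_zeros (c :: cs) size [] v hv
      have hrec := ihf (F + 1 - (c :: cs).length) (by omega) (dN + 1)
        (llevel size (c :: cs) ([], v)).1 (llevel size (c :: cs) ([], v)).2
        hl' hF2 hM2 (by omega)
        (by simp only [List.length_nil, Nat.zero_add] at hcz; omega)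
      have hcast : ((dN : Int) + 1) = (((dN + 1 : Nat)) : Int) := by push_cast; ring
      rw [hcast]
      exact hrec

-- ---------- characterizing B's level step ----------

theorem bcands_bnbr (size v u : Int) :
    (u ∈ bcands v ∧ 0 ≤ u ∧ u < size) ↔ bnbr size v u := by
  have hfd : PySem.Int.floordiv v 2 = v / 2 := PySem.Int.floordiv_eq_ediv_of_pos (by omega)
  have hmd : PySem.Int.mod v 2 = v % 2 := PySem.Int.mod_eq_emod_of_pos (by omega)
  unfold bcands bnbr
  rw [hfd, hmd]
  by_cases hev : v % 2 = 0
  · rw [if_pos hev]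
    simp only [List.mem_append, List.mem_cons, List.mem_singleton, List.not_mem_nil, or_false]
    constructor
    · rintro ⟨(h | h | h | h), h1, h2⟩ <;> refine ⟨?_, h1, h2⟩ <;> omega
    · rintro ⟨(h | h | h | h), h1, h2⟩ <;> refine ⟨?_, h1, h2⟩ <;> omega
  · rw [if_neg hev]
    simp only [List.append_nil, List.mem_cons, List.not_mem_nil, or_false]
    constructor
    · rintro ⟨(h | h | h), h1, h2⟩ <;> refine ⟨?_, h1, h2⟩ <;> omega
    · rintro ⟨(h | h | h | h), h1, h2⟩ <;> refine ⟨?_, h1, h2⟩ <;> omega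

theorem bkids_post : ∀ (cl : List Int) (size : Int) (acc : List Int) (w : Array Int),
    w.toList.length = size.toNat →
    ((cl.foldl (fun st u =>
        if 0 ≤ u ∧ u < size ∧ st.2.getD u.toNat 0 = 0 then
          (st.1 ++ [u], st.2.setIfInBounds u.toNat 1)
        else st) (acc, w)).2.toList.length = size.toNat) ∧
    (∀ u, marks size (cl.foldl (fun st u =>
        if 0 ≤ u ∧ u < size ∧ st.2.getD u.toNat 0 = 0 then
          (st.1 ++ [u], st.2.setIfInBounds u.toNat 1)
        else st) (acc, w)).2 u ↔
      marks size w u ∨ (u ∈ cl ∧ 0 ≤ u ∧ u < size)) ∧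
    (∀ u, u ∈ (cl.foldl (fun st u =>
        if 0 ≤ u ∧ u < size ∧ st.2.getD u.toNat 0 = 0 then
          (st.1 ++ [u], st.2.setIfInBounds u.toNat 1)
        else st) (acc, w)).1 ↔
      u ∈ acc ∨ ((u ∈ cl ∧ 0 ≤ u ∧ u < size) ∧ ¬ marks size w u)) := by
  intro cl
  induction cl with
  | nil =>
    intro size acc w hv
    refine ⟨hv, fun u => ?_, fun u => ?_⟩ <;> simp
  | cons c cl ih =>
    intro size acc w hv
    simp only [List.foldl_cons]
    by_cases hg : 0 ≤ c ∧ c < size ∧ w.getD c.toNat 0 = 0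
    · rw [if_pos hg]
      obtain ⟨hg1, hg2, hg3⟩ := hg
      have hms := marks_set hv hg1 hg2
      have hfresh : ¬ marks size w c := fun h => h.2.2 hg3
      obtain ⟨hl, hm, ha⟩ := ih size (acc ++ [c]) (w.setIfInBounds c.toNat 1) (by simp [hv])
      refine ⟨hl, fun u => ?_, fun u => ?_⟩
      · rw [hm u, hms u]
        simp only [List.mem_cons]
        by_cases hu : u = c
        · subst hu; tauto
        · tauto
      · rw [ha u, hms u]
        simp only [List.mem_append, List.mem_singleton, List.mem_cons]
        by_cases hu : u = c
        · subst hu; tauto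
        · tauto
    · rw [if_neg hg]
      obtain ⟨hl, hm, ha⟩ := ih size acc w hv
      refine ⟨hl, fun u => ?_, fun u => ?_⟩
      · rw [hm u]
        simp only [List.mem_cons]
        constructor
        · tauto
        · rintro (h | ⟨(rfl | hcd), h1, h2⟩)
          · tauto
          · exact Or.inl ⟨h1, h2, fun h0 => hg ⟨h1, h2, h0⟩⟩
          · tauto
      · rw [ha u]
        simp only [List.mem_cons]
        constructor
        · tauto
        · rintro (h | ⟨⟨(rfl | hcd), h1, h2⟩, hnm⟩)
          · tauto
          · exact absurd ⟨h1, h2, fun h0 => hg ⟨h1, h2, h0⟩⟩ hnm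
          · tauto

def BFC (size : Int) (front : List Int) (u : Int) : Prop := ∃ v ∈ front, bnbr size v u

theorem blevelB_post : ∀ (front : List Int) (size : Int) (acc : List Int) (w : Array Int),
    w.toList.length = size.toNat →
    (blevelB size front (acc, w)).2.toList.length = size.toNat ∧
    (∀ u, marks size (blevelB size front (acc, w)).2 u ↔
        marks size w u ∨ BFC size front u) ∧
    (∀ u, u ∈ (blevelB size front (acc, w)).1 ↔
        u ∈ acc ∨ (BFC size front u ∧ ¬ marks size w u)) := by
  intro front
  induction front with
  | nil =>
    intro size acc w hv
    refine ⟨hv, fun u => ?_, fun u => ?_⟩ <;> simp [blevelB, BFC]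
  | cons x rest ih =>
    intro size acc w hv
    have hstep : blevelB size (x :: rest) (acc, w) =
        blevelB size rest ((bcands x).foldl (fun st u =>
          if 0 ≤ u ∧ u < size ∧ st.2.getD u.toNat 0 = 0 then
            (st.1 ++ [u], st.2.setIfInBounds u.toNat 1)
          else st) (acc, w)) := by
      simp [blevelB]
    obtain ⟨hl1, hm1, ha1⟩ := bkids_post (bcands x) size acc w hv
    rcases hk : (bcands x).foldl (fun st u =>
        if 0 ≤ u ∧ u < size ∧ st.2.getD u.toNat 0 = 0 then
          (st.1 ++ [u], st.2.setIfInBounds u.toNat 1)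
        else st) (acc, w) with ⟨acc1, w1⟩
    rw [hk] at hl1 hm1 ha1
    obtain ⟨hl2, hm2, ha2⟩ := ih size acc1 w1 hl1
    rw [hstep, hk]
    have hfc : ∀ u, BFC size (x :: rest) u ↔ bnbr size x u ∨ BFC size rest u := by
      intro u
      simp only [BFC, List.mem_cons]
      constructor
      · rintro ⟨y, (rfl | hy), hn⟩
        · exact Or.inl hn
        · exact Or.inr ⟨y, hy, hn⟩
      · rintro (hn | ⟨y, hy, hn⟩)
        · exact ⟨x, Or.inl rfl, hn⟩
        · exact ⟨y, Or.inr hy, hn⟩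
    have hbb : ∀ u, (u ∈ bcands x ∧ 0 ≤ u ∧ u < size) ↔ bnbr size x u :=
      fun u => bcands_bnbr size x u
    refine ⟨hl2, fun u => ?_, fun u => ?_⟩
    · rw [hm2 u, hm1 u, hfc u]
      constructor
      · rintro ((h | hc) | h)
        · tauto
        · exact Or.inr (Or.inl ((hbb u).1 hc))
        · tauto
      · rintro (h | (hb | h))
        · tauto
        · exact Or.inl (Or.inr ((hbb u).2 hb))
        · tauto
    · rw [ha2 u, ha1 u, hfc u]
      constructor
      · rintro ((h | ⟨hc, hnm⟩) | ⟨hr, hnm⟩)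
        · tauto
        · exact Or.inr ⟨Or.inl ((hbb u).1 hc), hnm⟩
        · rw [hm1 u] at hnm
          push_neg at hnm
          exact Or.inr ⟨Or.inr hr, hnm.1⟩
      · rintro (h | ⟨(hx | hr), hnm⟩)
        · tauto
        · exact Or.inl (Or.inr ⟨(hbb u).2 hx, hnm⟩)
        · by_cases hx2 : bnbr size x u
          · exact Or.inl (Or.inr ⟨(hbb u).2 hx2, hnm⟩)
          · refine Or.inr ⟨hr, ?_⟩
            rw [hm1 u]
            rintro (h | hc)
            · exact hnm h
            · exact hx2 ((hbb u).1 hc)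

-- ---------- B's loop returns the minimal backward layer index of n ----------

theorem runB (size n m : Int) (d0 : Nat)
    (hd0 : W (bnbr size) m d0 n) (hmin : ∀ e, W (bnbr size) m e n → d0 ≤ e) :
    ∀ (fuel : Nat), ∀ (dN : Nat) (frontier : List Int) (seen : Array Int),
    seen.toList.length = size.toNat →
    (∀ u, u ∈ frontier ↔ W (bnbr size) m dN u ∧ ¬ ∃ e, e < dN ∧ W (bnbr size) m e u) →
    (∀ u, marks size seen u ↔ W (bnbr size) m dN u) →
    dN ≤ d0 → d0 < dN + fuel →
    bloopB n size fuel frontier seen (dN : Int) = some (d0 : Int) := by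
  intro fuel
  induction fuel with
  | zero => intro dN frontier seen _ _ _ _ h; omega
  | succ F ih =>
    intro dN frontier seen hv hF hM hdle hfuel
    rw [bloopB]
    by_cases hn : n ∈ frontier
    · rw [if_pos hn]
      have : d0 ≤ dN := hmin dN ((hF n).1 hn).1
      have : dN = d0 := by omega
      subst this
      rfl
    · rw [if_neg hn]
      have hdlt : dN < d0 := by
        rcases Nat.lt_or_ge dN d0 with h | h
        · exact h
        · exfalso
          have : dN = d0 := by omega
          subst this
          exact hn ((hF n).2 ⟨hd0, fun ⟨e, he, hw⟩ => by have := hmin e hw; omega⟩)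
      obtain ⟨hl', hm', ha'⟩ := blevelB_post frontier size [] seen hv
      obtain ⟨hM2, hF2⟩ := stepInv hF hM
        (M' := fun u => marks size (blevelB size frontier ([], seen)).2 u)
        (F' := fun u => u ∈ (blevelB size frontier ([], seen)).1)
        (by intro u
            show marks size (blevelB size frontier ([], seen)).2 u ↔
              marks size seen u ∨ ∃ x, x ∈ frontier ∧ bnbr size x u
            rw [hm' u]
            unfold BFC
            exact Iff.rfl)
        (by intro u
            show u ∈ (blevelB size frontier ([], seen)).1 ↔
              (∃ x, x ∈ frontier ∧ bnbr size x u) ∧ ¬ marks size seen u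
            rw [ha' u]
            unfold BFC
            simp only [List.not_mem_nil, false_or])
      have hcast : ((dN : Int) + 1) = (((dN + 1 : Nat)) : Int) := by push_cast; ring
      rw [hcast]
      exact ih (dN + 1) _ _ hl' hF2 hM2 (by omega) (by omega)

-- ---------- ±1 chains give existence and a size bound for the minimal layer ----------

theorem chain_up (size : Int) : ∀ (k : Nat) (a : Int), 0 ≤ a → a + k < size →
    W (fnbr size) a k (a + k) := by
  intro k
  induction k with
  | zero =>
    intro a _ _
    show (a + ((0 : Nat) : Int)) = a
    push_cast
    ring
  | succ k ih =>
    intro a ha hlt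
    refine Or.inr ⟨a + k, ih a ha (by push_cast at hlt ⊢; omega), ?_⟩
    refine ⟨Or.inl (by push_cast; ring), by omega, by push_cast at hlt ⊢; omega⟩

theorem chain_down (size : Int) : ∀ (k : Nat) (a : Int), 0 ≤ a - k → a < size →
    W (fnbr size) a k (a - k) := by
  intro k
  induction k with
  | zero =>
    intro a _ _
    show (a - ((0 : Nat) : Int)) = a
    push_cast
    ring
  | succ k ih =>
    intro a ha hlt
    refine Or.inr ⟨a - k, ih a (by push_cast at ha ⊢; omega) hlt, ?_⟩
    refine ⟨Or.inr (Or.inl (by push_cast; ring)), by push_cast at ha ⊢; omega,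
      by push_cast at ha ⊢; omega⟩

theorem reach_chain (size n m : Int) (hn : 0 ≤ n) (hm : 0 ≤ m)
    (hns : n < size) (hms : m < size) : W (fnbr size) n (m - n).natAbs m := by
  rcases le_total n m with h | h
  · obtain ⟨k, hk⟩ : ∃ k : Nat, m = n + k := ⟨(m - n).toNat, by omega⟩
    subst hk
    have hna : ((n + (k : Int)) - n).natAbs = k := by omega
    rw [hna]
    exact chain_up size k n hn (by omega)
  · obtain ⟨k, hk⟩ : ∃ k : Nat, m = n - k := ⟨(n - m).toNat, by omega⟩
    subst hk
    have hna : ((n - (k : Int)) - n).natAbs = k := by omega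
    rw [hna]
    exact chain_down size k n (by omega) hns

-- ---------- the duality instance for this graph ----------

theorem fnbr_bnbr (size : Int) : ∀ x y, (0 ≤ x ∧ x < size) → (0 ≤ y ∧ y < size) →
    (fnbr size x y ↔ bnbr size y x) := by
  intro x y hx hy
  unfold fnbr bnbr
  constructor
  · rintro ⟨(h | h | h | h), _, _⟩ <;> exact ⟨by omega, hx.1, hx.2⟩
  · rintro ⟨(h | h | h | h), _, _⟩ <;> exact ⟨by omega, hy.1, hy.2⟩

theorem W_dual (size n m : Int) (hn : 0 ≤ n ∧ n < size) (hm : 0 ≤ m ∧ m < size) :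
    ∀ d, W (fnbr size) n d m ↔ W (bnbr size) m d n := by
  intro d
  exact W_swap (R := fun u => 0 ≤ u ∧ u < size)
    (fun x y hxy => ⟨hxy.2.1, hxy.2.2⟩) (fun x y hxy => ⟨hxy.2.1, hxy.2.2⟩)
    (fnbr_bnbr size) d n m hn hm

-- ---------- assembly ----------

theorem bfs_eq_alt (n m : Int) (hn : 0 ≤ n) (hm : 0 ≤ m) : bfs n m = bfs_alt n m := by
  classical
  have hmax1 : m ≤ max m n := le_max_left m n
  have hmax2 : n ≤ max m n := le_max_right m n
  have hsize : 0 < max m n * 2 + 1 := by omega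
  set size := max m n * 2 + 1 with hs
  have hnr : 0 ≤ n ∧ n < size := ⟨hn, by omega⟩
  have hmr : 0 ≤ m ∧ m < size := ⟨hm, by omega⟩
  -- existence of a forward walk n → m and a bound on its length
  have hchain : W (fnbr size) n (m - n).natAbs m :=
    reach_chain size n m hn hm (by omega) (by omega)
  have hex : ∃ d, W (fnbr size) n d m := ⟨(m - n).natAbs, hchain⟩
  set d0 := Nat.find hex with hd0def
  have hd0 : W (fnbr size) n d0 m := Nat.find_spec hex
  have hmin : ∀ e, W (fnbr size) n e m → d0 ≤ e := fun e he => Nat.find_min' hex he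
  have hd0bound : d0 ≤ size.toNat := by
    have hb := Nat.find_min' hex hchain
    omega
  -- A's side
  have hA : bfs n m = (d0 : Int) := by
    show (let size := max m n * 2 + 1
      let visited := (List.replicate size.toNat (0 : Int)).toArray.setIfInBounds
        (if n < 0 then (size + n).toNat else n.toNat) 1
      (aloop m size (size.toNat + 2) [(0, n)] visited).getD 0) = (d0 : Int)
    simp only [← hs]
    rw [if_neg (by omega : ¬ n < 0)]
    set v0 := (List.replicate size.toNat (0 : Int)).toArray.setIfInBounds n.toNat 1 with hv0
    have hlen : v0.toList.length = size.toNat := by simp [hv0]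
    have hm0 : ∀ u, marks size v0 u ↔ W (fnbr size) n 0 u := by
      intro u
      show marks size v0 u ↔ u = n
      have hms := marks_set (size := size)
        (v := (List.replicate size.toNat (0 : Int)).toArray) (c := n)
        (by simp) hn (by omega)
      rw [hms u]
      constructor
      · rintro (⟨h0, hsu, hne⟩ | he)
        · exfalso
          apply hne
          rw [arr_getD]
          simp [List.getD_eq_getElem?_getD, List.getElem?_replicate]
          split <;> rfl
        · exact he
      · intro he
        exact Or.inr he
    have hf0 : ∀ u, u ∈ [n] ↔ W (fnbr size) n 0 u ∧ ¬ ∃ e, e < 0 ∧ W (fnbr size) n e u := by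
      intro u
      simp only [List.mem_singleton]
      constructor
      · intro h; exact ⟨h, by omega⟩
      · intro h; exact h.1
    have hcnt : ([n] : List Int).length + v0.toList.count 0 < size.toNat + 2 := by
      have : v0.toList.count 0 ≤ v0.toList.length := List.count_le_length
      simp only [List.length_singleton]
      omega
    have := runA size n m d0 hd0 hmin (size.toNat + 2) 0 [n] v0 hlen hf0 hm0
      (by omega) hcnt
    simp only [List.map_cons, List.map_nil, Nat.cast_zero] at this
    rw [this]
    rfl
  -- B's side
  have hB : bfs_alt n m = (d0 : Int) := by
    show (let size := max m n * 2 + 1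
      let seen := (List.replicate size.toNat (0 : Int)).toArray.setIfInBounds m.toNat 1
      (bloopB n size (size.toNat + 2) [m] seen 0).getD 0) = (d0 : Int)
    simp only [← hs]
    set s0 := (List.replicate size.toNat (0 : Int)).toArray.setIfInBounds m.toNat 1 with hs0
    have hdualall := W_dual size n m hnr hmr
    have hd0' : W (bnbr size) m d0 n := (hdualall d0).1 hd0
    have hmin' : ∀ e, W (bnbr size) m e n → d0 ≤ e := fun e he =>
      hmin e ((hdualall e).2 he)
    have hlen : s0.toList.length = size.toNat := by simp [hs0]
    have hm0 : ∀ u, marks size s0 u ↔ W (bnbr size) m 0 u := by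
      intro u
      show marks size s0 u ↔ u = m
      have hms := marks_set (size := size)
        (v := (List.replicate size.toNat (0 : Int)).toArray) (c := m)
        (by simp) hm (by omega)
      rw [hms u]
      constructor
      · rintro (⟨h0, hsu, hne⟩ | he)
        · exfalso
          apply hne
          rw [arr_getD]
          simp [List.getD_eq_getElem?_getD, List.getElem?_replicate]
          split <;> rfl
        · exact he
      · intro he
        exact Or.inr he
    have hf0 : ∀ u, u ∈ [m] ↔
        W (bnbr size) m 0 u ∧ ¬ ∃ e, e < 0 ∧ W (bnbr size) m e u := by
      intro u
      simp only [List.mem_singleton]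
      constructor
      · intro h; exact ⟨h, by omega⟩
      · intro h; exact h.1
    have := runB size n m d0 hd0' hmin' (size.toNat + 2) 0 [m] s0 hlen hf0 hm0
      (by omega) (by omega)
    simp only [Nat.cast_zero] at this
    rw [this]
    rfl
  rw [hA, hB]

-- ===== VERDICT (by name: the statement is the Claim_ definition above) =====
theorem bfs_spec : Claim_equal_bfs := by
  intro n m _ hpre
  show bfs n m = bfs_alt n m
  exact bfs_eq_alt n m hpre.1 hpre.2
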